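-- pv_equiv track=rewrite | github.com/sirivalli224/PAI_lab | CSP.py | is_consistant
-- ===== SOURCE A (Python) =====
-- def constraint_func(names, values):
--     return values[0] != values[1]
--
-- def is_consistant(variable,value,ass,const):
--     for (var1,var2) in const:
--         if var1==variable and var2 in ass:
--             if not constraint_func((var1,var2),(value,ass[var2])):
--                                    return False
--         if var2==variable and var1 in ass:
--             if not constraint_func((var1,var2),(ass[var1],value)):
--                                    return False
--     return True
-- ===== SOURCE B (Python) =====
-- def is_consistant(variable, value, ass, const):
--     pairs = set(const)
--     for n, w in ass.items():
--         if ((variable, n) in pairs or (n, variable) in pairs) and value == w: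
--             return False
--     return True
-- ===== Notes on version B (the rewrite author's own statement) =====
-- stated objective: alternative
-- what changed: B inverts the traversal: it builds a set of the constraint pairs once and loops over the assignment, testing (variable,n)/(n,variable) membership, instead of A's loop over the constraint list with repeated dict lookups.
import Mathlib
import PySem

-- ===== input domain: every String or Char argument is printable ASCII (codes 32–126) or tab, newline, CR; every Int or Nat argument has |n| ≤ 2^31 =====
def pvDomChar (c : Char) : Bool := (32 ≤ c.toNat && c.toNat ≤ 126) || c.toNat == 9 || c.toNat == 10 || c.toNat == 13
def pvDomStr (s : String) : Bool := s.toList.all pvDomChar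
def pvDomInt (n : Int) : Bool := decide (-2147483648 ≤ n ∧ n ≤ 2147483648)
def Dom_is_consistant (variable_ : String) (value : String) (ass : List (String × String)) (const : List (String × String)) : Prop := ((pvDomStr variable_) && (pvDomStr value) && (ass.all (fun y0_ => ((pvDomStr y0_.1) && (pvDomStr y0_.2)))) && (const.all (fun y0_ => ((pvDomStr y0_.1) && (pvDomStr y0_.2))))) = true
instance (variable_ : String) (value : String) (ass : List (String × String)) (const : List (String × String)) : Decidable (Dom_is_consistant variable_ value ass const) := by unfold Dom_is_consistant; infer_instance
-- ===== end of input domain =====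

-- B inverts A's traversal: a prebuilt set of constraint pairs, one loop over the assignment; return values proved equal.

-- ===== PORT A =====
def constraint_func (names : String × String) (values : String × String) : Bool :=
  values.1 != values.2

-- the loop 'for (var1,var2) in const: …' of A; 'var2 in ass' / 'ass[var2]' are
-- first-match association-list lookup (exact for a Python dict, whose keys are unique)
def isConsA_go (variable_ : String) (value : String) (ass : List (String × String)) :
    List (String × String) → Bool
  | [] => true
  | (var1, var2) :: rest =>
    if var1 == variable_ && (List.lookup var2 ass).isSome &&
        !(constraint_func (var1, var2) (value, (List.lookup var2 ass).getD "")) then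
      false
    else if var2 == variable_ && (List.lookup var1 ass).isSome &&
        !(constraint_func (var1, var2) ((List.lookup var1 ass).getD "", value)) then
      false
    else isConsA_go variable_ value ass rest

def is_consistant (variable_ : String) (value : String) (ass : List (String × String)) (const : List (String × String)) : Bool :=
  isConsA_go variable_ value ass const

-- ===== PORT B =====
-- the loop 'for n, w in ass.items(): …' of B
def isConsB_go (variable_ : String) (value : String) (pairs : PySem.Set (String × String)) :
    List (String × String) → Bool
  | [] => true
  | (n, w) :: rest =>
    if (PySem.Set.contains pairs (variable_, n) || PySem.Set.contains pairs (n, variable_)) && value == w then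
      false
    else isConsB_go variable_ value pairs rest

def is_consistant_alt (variable_ : String) (value : String) (ass : List (String × String)) (const : List (String × String)) : Bool :=
  isConsB_go variable_ value (PySem.Set.ofList const) ass

-- ===== PRECONDITION & SPEC =====
-- Pre_ excludes association lists 'ass' with duplicate keys: they represent no Python dict
-- (the Python argument is a dict, whose keys are necessarily distinct).
def Pre_is_consistant (variable_ : String) (value : String) (ass : List (String × String)) (const : List (String × String)) : Prop :=
  (ass.map Prod.fst).Nodup
instance (variable_ : String) (value : String) (ass : List (String × String)) (const : List (String × String)) : Decidable (Pre_is_consistant variable_ value ass const) := by unfold Pre_is_consistant; infer_instance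

def pvWitness_is_consistant : String × String × (List (String × String)) × (List (String × String)) :=
  ("a", "x", [("b", "y")], [("a", "b")])

def Spec_is_consistant (variable_ : String) (value : String) (ass : List (String × String)) (const : List (String × String)) (out : Bool) : Prop := out = is_consistant_alt variable_ value ass const
instance (variable_ : String) (value : String) (ass : List (String × String)) (const : List (String × String)) (out : Bool) : Decidable (Spec_is_consistant variable_ value ass const out) := by unfold Spec_is_consistant; infer_instance

-- ===== CLAIM (what is proved, stated in full; the proofs are below) =====
def Claim_equal_is_consistant : Prop := ∀ (variable_ : String) (value : String) (ass : List (String × String)) (const : List (String × String)), Dom_is_consistant variable_ value ass const → Pre_is_consistant variable_ value ass const → Spec_is_consistant variable_ value ass const (is_consistant variable_ value ass const)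

-- ===== LEMMAS AND PROOFS =====

theorem lookup_eq_some_iff_mem {k w : String} {ass : List (String × String)}
    (h : (ass.map Prod.fst).Nodup) : List.lookup k ass = some w ↔ (k, w) ∈ ass := by
  induction ass with
  | nil => simp [List.lookup]
  | cons p rest ih =>
    obtain ⟨a, b⟩ := p
    simp only [List.map_cons, List.nodup_cons] at h
    by_cases hk : k = a
    · subst hk
      simp only [List.lookup, beq_self_eq_true, List.mem_cons, Option.some.injEq,
        Prod.mk.injEq, true_and]
      constructor
      · intro h'; left; exact h'.symm
      · rintro (rfl | h')
        · rfl
        · exact absurd (List.mem_map_of_mem (f := Prod.fst) h') h.1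
    · have hbeq : (k == a) = false := by simp [hk]
      simp only [List.lookup, hbeq, List.mem_cons, Prod.mk.injEq]
      rw [ih h.2]
      constructor
      · intro h'; right; exact h'
      · rintro (⟨rfl, -⟩ | h')
        · exact absurd rfl hk
        · exact h'

theorem isConsA_go_eq_false_iff (V val : String) (ass cs : List (String × String)) :
    isConsA_go V val ass cs = false ↔
      ∃ p ∈ cs,
        (p.1 = V ∧ (List.lookup p.2 ass).isSome = true ∧ val = (List.lookup p.2 ass).getD "") ∨
        (p.2 = V ∧ (List.lookup p.1 ass).isSome = true ∧ (List.lookup p.1 ass).getD "" = val) := by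
  induction cs with
  | nil => simp [isConsA_go]
  | cons p rest ih =>
    obtain ⟨v1, v2⟩ := p
    simp only [isConsA_go, constraint_func]
    split_ifs with h1 h2
    · simp only [Bool.and_eq_true, beq_iff_eq, Bool.not_eq_true', bne_eq_false_iff_eq] at h1
      exact iff_of_true rfl ⟨(v1, v2), List.mem_cons_self .., Or.inl ⟨h1.1.1, h1.1.2, h1.2⟩⟩
    · simp only [Bool.and_eq_true, beq_iff_eq, Bool.not_eq_true', bne_eq_false_iff_eq] at h2
      exact iff_of_true rfl ⟨(v1, v2), List.mem_cons_self .., Or.inr ⟨h2.1.1, h2.1.2, h2.2⟩⟩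
    · rw [ih]
      simp only [Bool.and_eq_true, beq_iff_eq, Bool.not_eq_true', bne_eq_false_iff_eq,
        not_and] at h1 h2
      constructor
      · rintro ⟨q, hq, hcond⟩; exact ⟨q, List.mem_cons_of_mem _ hq, hcond⟩
      · rintro ⟨q, hq, hcond⟩
        rcases List.mem_cons.mp hq with rfl | hq'
        · exfalso
          rcases hcond with ⟨ha, hb, hc⟩ | ⟨ha, hb, hc⟩
          · exact h1 ⟨ha, hb⟩ hc
          · exact h2 ⟨ha, hb⟩ hc
        · exact ⟨q, hq', hcond⟩

theorem isConsB_go_eq_false_iff (V val : String) (pairs : PySem.Set (String × String))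
    (l : List (String × String)) :
    isConsB_go V val pairs l = false ↔
      ∃ q ∈ l, ((V, q.1) ∈ pairs ∨ (q.1, V) ∈ pairs) ∧ val = q.2 := by
  induction l with
  | nil => simp [isConsB_go]
  | cons q rest ih =>
    obtain ⟨n, w⟩ := q
    simp only [isConsB_go]
    split_ifs with h
    · simp only [Bool.and_eq_true, Bool.or_eq_true, PySem.Set.contains_iff, beq_iff_eq] at h
      exact iff_of_true rfl ⟨(n, w), List.mem_cons_self .., h.1, h.2⟩
    · rw [ih]
      simp only [Bool.and_eq_true, Bool.or_eq_true, PySem.Set.contains_iff, beq_iff_eq,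
        not_and] at h
      constructor
      · rintro ⟨q, hq, hcond⟩; exact ⟨q, List.mem_cons_of_mem _ hq, hcond⟩
      · rintro ⟨q, hq, hcond⟩
        rcases List.mem_cons.mp hq with rfl | hq'
        · exact absurd hcond.2 (h hcond.1)
        · exact ⟨q, hq', hcond⟩

theorem false_iff_false (V val : String) (ass cs : List (String × String))
    (h : (ass.map Prod.fst).Nodup) :
    is_consistant V val ass cs = false ↔ is_consistant_alt V val ass cs = false := by
  unfold is_consistant is_consistant_alt
  rw [isConsA_go_eq_false_iff, isConsB_go_eq_false_iff]
  constructor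
  · rintro ⟨⟨v1, v2⟩, hp, hcond⟩
    rcases hcond with ⟨rfl, hsome, hval⟩ | ⟨rfl, hsome, hval⟩
    · obtain ⟨w, hw⟩ := Option.isSome_iff_exists.mp hsome
      refine ⟨(v2, w), (lookup_eq_some_iff_mem h).mp hw, Or.inl ?_, ?_⟩
      · simpa [PySem.Set.mem_ofList] using hp
      · simpa [hw] using hval
    · obtain ⟨w, hw⟩ := Option.isSome_iff_exists.mp hsome
      refine ⟨(v1, w), (lookup_eq_some_iff_mem h).mp hw, Or.inr ?_, ?_⟩
      · simpa [PySem.Set.mem_ofList] using hp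
      · simp only [hw, Option.getD_some] at hval; exact hval.symm
  · rintro ⟨⟨n, w⟩, hq, hmem, hval⟩
    have hlk : List.lookup n ass = some w := (lookup_eq_some_iff_mem h).mpr hq
    rcases hmem with hm | hm
    · rw [PySem.Set.mem_ofList] at hm
      exact ⟨(V, n), hm, Or.inl ⟨rfl, by simp [hlk], by simp [hlk, hval]⟩⟩
    · rw [PySem.Set.mem_ofList] at hm
      exact ⟨(n, V), hm, Or.inr ⟨rfl, by simp [hlk], by simp [hlk]; exact hval.symm⟩⟩

-- ===== VERDICT (by name: the statement is the Claim_ definition above) =====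
theorem is_consistant_spec : Claim_equal_is_consistant := by
  intro V val ass cs _ hpre
  unfold Spec_is_consistant
  have h := false_iff_false V val ass cs hpre
  cases hA : is_consistant V val ass cs <;> cases hB : is_consistant_alt V val ass cs <;>
    simp_all
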